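-- pv_equiv track=rewrite | github.com/SofferLior/TAU_Israel_Software | under_the_hood/boom.py | get_top_heuristic_grades
-- ===== SOURCE A (Python) =====
-- def get_top_heuristic_grades(grades_dict, threshold):
--     grades_list = list(grades_dict.keys())
--     grades_list.sort(reverse=True)
--     top_grades_set = set()
--     i = 0
--     while len(top_grades_set)< threshold:
--         top_grades_set = top_grades_set.union(grades_dict[grades_list[i]])
--         i = i + 1
--     return top_grades_set
-- ===== SOURCE B (Python) =====
-- def get_top_heuristic_grades(grades_dict, threshold):
--     # Selection instead of sorting: never sort the keys; repeatedly extract the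
--     # item with the currently largest grade (a lazy max scan over the remaining
--     # items) and pour its values into the set until it reaches the threshold.
--     items = list(grades_dict.items())
--     top = set()
--     while len(top) < threshold:
--         best = max(items, key=lambda kv: kv[0])
--         items.remove(best)
--         top.update(best[1])
--     return top
-- ===== Notes on version B (the rewrite author's own statement) =====
-- stated objective: alternative
-- what changed: B never sorts: it does lazy selection, repeatedly scanning the remaining items for the one with the largest grade, removing it and pouring its values into the set until the threshold is reached (O(k*n) selection instead of A's O(n log n) full sort plus indexed walk); correct because extracting the max of distinct keys k times visits the keys in exactly descending order.
import Mathlib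
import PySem

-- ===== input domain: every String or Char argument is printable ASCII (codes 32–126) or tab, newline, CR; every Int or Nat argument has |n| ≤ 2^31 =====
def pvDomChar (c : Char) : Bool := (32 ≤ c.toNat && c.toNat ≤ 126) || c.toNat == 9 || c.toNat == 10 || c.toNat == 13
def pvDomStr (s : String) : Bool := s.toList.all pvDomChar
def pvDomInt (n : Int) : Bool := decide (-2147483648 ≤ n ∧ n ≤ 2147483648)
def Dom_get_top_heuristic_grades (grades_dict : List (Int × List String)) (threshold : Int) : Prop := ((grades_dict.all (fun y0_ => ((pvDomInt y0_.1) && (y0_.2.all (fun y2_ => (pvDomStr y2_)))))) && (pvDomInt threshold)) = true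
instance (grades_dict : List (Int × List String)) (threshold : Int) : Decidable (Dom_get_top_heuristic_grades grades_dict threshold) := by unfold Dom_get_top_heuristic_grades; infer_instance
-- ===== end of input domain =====

-- B replaces A's sort-then-walk with selection: it never sorts, but repeatedly
-- extracts the remaining item with the largest grade (lazy max scan) until the
-- set reaches the threshold; same return value, different algorithm.


-- ===== PORT A =====
-- while len(top_grades_set) < threshold: top_grades_set = top_grades_set.union(grades_dict[grades_list[i]]); i += 1
-- The index walk over the sorted key list is recursion over the remaining keys; on
-- key exhaustion Python raises IndexError (excluded by Pre_), here the loop stops.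
def pvLoopA (grades_dict : List (Int × List String)) (threshold : Int) :
    PySem.Set String → List Int → PySem.Set String
  | acc, [] => acc
  | acc, k :: ks =>
      if PySem.Set.len acc < threshold then
        pvLoopA grades_dict threshold
          (PySem.Set.union acc ((List.lookup k grades_dict).getD [])) ks
      else acc

def get_top_heuristic_grades (grades_dict : List (Int × List String)) (threshold : Int) : List String :=
  let grades_list := PySem.List.sorted (PySem.List.dedup (grades_dict.map (·.1))) (fun x => x) true
  pvLoopA grades_dict threshold PySem.Set.empty grades_list

-- ===== PORT B =====
-- while len(top) < threshold: best = max(items, key=kv[0]); items.remove(best); top.update(best[1])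
-- max on an exhausted items list raises ValueError in Python (excluded by Pre_);
-- here the loop stops.  items.remove(best) is PySem.List.remove?, defined since
-- max? just found best in items.
def pvLoopB (threshold : Int) (acc : PySem.Set String) (items : List (Int × List String)) :
    PySem.Set String :=
  if threshold ≤ PySem.Set.len acc then acc
  else
    match h : PySem.List.max? items (fun kv => kv.1) with
    | none => acc
    | some best =>
        pvLoopB threshold (PySem.Set.update acc best.2) ((PySem.List.remove? items best).getD [])
termination_by items.length
decreasing_by
  rw [PySem.List.remove?_eq_some_erase items best (PySem.List.max?_mem h)]
  have h1 := List.length_erase_of_mem (PySem.List.max?_mem h)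
  have h2 := List.length_pos_of_mem (PySem.List.max?_mem h)
  simp only [Option.getD_some, h1]
  omega

def get_top_heuristic_grades_alt (grades_dict : List (Int × List String)) (threshold : Int) : List String :=
  pvLoopB threshold PySem.Set.empty grades_dict

-- ===== PRECONDITION & SPEC =====
-- Pre_ excludes (i) association lists with duplicate keys, which do not represent a
-- Python dict (A's argument is a dict, so its keys are necessarily distinct), and
-- (ii) thresholds larger than the number of distinct values in the whole dict, on
-- which Python A raises IndexError (it indexes past the end of its key list) and
-- Python B raises ValueError (max of an exhausted item list).
def Pre_get_top_heuristic_grades (grades_dict : List (Int × List String)) (threshold : Int) : Prop :=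
  (grades_dict.map Prod.fst).Nodup ∧
  threshold ≤ ((PySem.Set.ofList (grades_dict.flatMap Prod.snd) : PySem.Set String).length : Int)
instance (grades_dict : List (Int × List String)) (threshold : Int) : Decidable (Pre_get_top_heuristic_grades grades_dict threshold) := by unfold Pre_get_top_heuristic_grades; infer_instance

def pvWitness_get_top_heuristic_grades : (List (Int × List String)) × Int :=
  ([(1, ["a"]), (2, ["b", "c"])], 2)

def Spec_get_top_heuristic_grades (grades_dict : List (Int × List String)) (threshold : Int) (out : List String) : Prop := out = get_top_heuristic_grades_alt grades_dict threshold
instance (grades_dict : List (Int × List String)) (threshold : Int) (out : List String) : Decidable (Spec_get_top_heuristic_grades grades_dict threshold out) := by unfold Spec_get_top_heuristic_grades; infer_instance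

-- ===== CLAIM (what is proved, stated in full; the proofs are below) =====
def Claim_equal_get_top_heuristic_grades : Prop := ∀ (grades_dict : List (Int × List String)) (threshold : Int), Dom_get_top_heuristic_grades grades_dict threshold → Pre_get_top_heuristic_grades grades_dict threshold → Spec_get_top_heuristic_grades grades_dict threshold (get_top_heuristic_grades grades_dict threshold)

-- ===== LEMMAS AND PROOFS =====

-- proof-only helper: A's loop re-read over the sorted ITEM list (key + its value)
def pvWalk (threshold : Int) : PySem.Set String → List (Int × List String) → PySem.Set String
  | acc, [] => acc
  | acc, p :: ps =>
      if threshold ≤ PySem.Set.len acc then acc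
      else pvWalk threshold (p.2.foldl PySem.Set.add acc) ps

-- first-match association lookup on a duplicate-free list finds the pair's value
theorem pv_lookup_of_mem {gd : List (Int × List String)} {k : Int} {v : List String}
    (hnd : (gd.map Prod.fst).Nodup) (hm : (k, v) ∈ gd) : List.lookup k gd = some v := by
  induction gd with
  | nil => cases hm
  | cons p rest ih =>
      simp only [List.map_cons, List.nodup_cons, List.mem_map] at hnd
      rcases List.mem_cons.mp hm with h | h
      · subst h; simp [List.lookup]
      · have hne : k ≠ p.1 := by
          intro he
          exact hnd.1 ⟨(k, v), h, by simp [he]⟩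
        have hb : (k == p.1) = false := by simpa using hne
        simp only [List.lookup, hb]
        exact ih hnd.2 h

-- A's key-indexed loop equals the item walk when every listed key looks up to its value
theorem pv_loopA_eq_walk (gd : List (Int × List String)) (th : Int)
    (ps : List (Int × List String)) (acc : PySem.Set String)
    (h : ∀ p ∈ ps, (List.lookup p.1 gd).getD [] = p.2) :
    pvLoopA gd th acc (ps.map Prod.fst) = pvWalk th acc ps := by
  induction ps generalizing acc with
  | nil => rfl
  | cons p ps ih =>
      simp only [List.map_cons, pvLoopA, pvWalk]
      by_cases hc : PySem.Set.len acc < th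
      · rw [if_pos hc, if_neg (by omega), h p List.mem_cons_self]
        exact ih _ (fun q hq => h q (List.mem_cons_of_mem _ hq))
      · rw [if_neg hc, if_pos (by omega)]

-- the descending-sorted key list is the key column of the descending-sorted items
theorem pv_keys_eq (gd : List (Int × List String))
    (hnd : (gd.map Prod.fst).Nodup) :
    PySem.List.sorted (PySem.List.dedup (gd.map (·.1))) (fun x => x) true
      = (PySem.List.sorted gd (fun p => p.1) true).map (·.1) := by
  have hd : PySem.List.dedup (gd.map (·.1)) = gd.map (·.1) := by
    rw [PySem.List.dedup_eq_ofList]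
    exact PySem.Set.ofList_eq_self_of_nodup _ hnd
  rw [hd]
  have hperm : ((PySem.List.sorted gd (fun p => p.1) true).map (·.1)).Perm (gd.map (·.1)) :=
    (PySem.List.sorted_perm gd (fun p => p.1) true).map _
  have hnd' : ((PySem.List.sorted gd (fun p => p.1) true).map (·.1)).Nodup :=
    hperm.nodup_iff.mpr hnd
  have hle : (PySem.List.sorted gd (fun p => p.1) true).Pairwise (fun a b => b.1 ≤ a.1) :=
    PySem.List.sorted_pairwise_rev gd (fun p => p.1)
  have hgt : ((PySem.List.sorted gd (fun p => p.1) true).map (·.1)).Pairwise (fun a b => b < a) := by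
    have hne : ((PySem.List.sorted gd (fun p => p.1) true).map (·.1)).Pairwise (fun a b => a ≠ b) := hnd'
    rw [List.pairwise_map] at hne ⊢
    exact (hle.and hne).imp (fun h => lt_of_le_of_ne h.1 (Ne.symm h.2))
  exact PySem.List.sorted_rev_eq_of_perm_of_pairwise_gt _ _ _ hperm hgt

-- SELECTION = SORTING, one step: on duplicate-free keys, the descending sort of the
-- items is the max item followed by the descending sort of the items with it removed
theorem pv_sorted_cons_max (items : List (Int × List String)) (best : Int × List String)
    (hnd : (items.map Prod.fst).Nodup)
    (hmax : PySem.List.max? items (fun kv => kv.1) = some best) :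
    PySem.List.sorted items (fun p => p.1) true
      = best :: PySem.List.sorted (items.erase best) (fun p => p.1) true := by
  have hmem : best ∈ items := PySem.List.max?_mem hmax
  have hperm : (best :: PySem.List.sorted (items.erase best) (fun p => p.1) true).Perm items := by
    exact ((PySem.List.sorted_perm _ _ _).cons best).trans (List.perm_cons_erase hmem).symm
  have hsubl : (items.erase best).Sublist items := List.erase_sublist
  have hndtail : ((items.erase best).map Prod.fst).Nodup :=
    hnd.sublist (hsubl.map Prod.fst)
  have hstrict : ∀ q ∈ items.erase best, q.1 < best.1 := by
    intro q hq
    have hqmem : q ∈ items := hsubl.mem hq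
    have hle : q.1 ≤ best.1 := PySem.List.max?_isMax hmax q hqmem
    rcases eq_or_lt_of_le hle with he | hlt
    · exfalso
      have hqb : q = best := List.inj_on_of_nodup_map hnd hqmem hmem he
      have hndItems : items.Nodup := hnd.of_map
      exact (hndItems.mem_erase_iff.mp (hqb ▸ hq)).1 rfl
    · exact hlt
  have hpw : (best :: PySem.List.sorted (items.erase best) (fun p => p.1) true).Pairwise
      (fun a b => b.1 < a.1) := by
    refine List.pairwise_cons.mpr ⟨?_, ?_⟩
    · intro q hq
      exact hstrict q ((PySem.List.mem_sorted _ _ _ _).mp hq)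
    · have hle : (PySem.List.sorted (items.erase best) (fun p => p.1) true).Pairwise
          (fun a b => b.1 ≤ a.1) := PySem.List.sorted_pairwise_rev _ _
      have hne : (PySem.List.sorted (items.erase best) (fun p => p.1) true).Pairwise
          (fun a b => a.1 ≠ b.1) := by
        have h1 : ((PySem.List.sorted (items.erase best) (fun p => p.1) true).map Prod.fst).Nodup :=
          (((PySem.List.sorted_perm _ _ _).map Prod.fst).nodup_iff).mpr hndtail
        exact List.pairwise_map.mp h1
      exact (hle.and hne).imp (fun h => lt_of_le_of_ne h.1 (Ne.symm h.2))
  exact PySem.List.sorted_rev_eq_of_perm_of_pairwise_gt _ _ _ hperm hpw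

-- the walk stops as soon as the set is big enough
theorem pv_walk_stop (th : Int) (acc : PySem.Set String) (l : List (Int × List String))
    (h : th ≤ PySem.Set.len acc) : pvWalk th acc l = acc := by
  cases l with
  | nil => rfl
  | cons p ps => simp only [pvWalk, if_pos h]

-- B's selection loop equals the walk over the descending-sorted items (fuelled induction)
theorem pv_loopB_eq_walk_aux (n : Nat) (th : Int) (items : List (Int × List String))
    (acc : PySem.Set String) (hlen : items.length ≤ n) (hnd : (items.map Prod.fst).Nodup) :
    pvLoopB th acc items = pvWalk th acc (PySem.List.sorted items (fun p => p.1) true) := by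
  induction n generalizing items acc with
  | zero =>
      have : items = [] := List.length_eq_zero_iff.mp (Nat.le_zero.mp hlen)
      subst this
      rw [pvLoopB]
      by_cases hth : th ≤ PySem.Set.len acc
      · rw [if_pos hth]; exact (pv_walk_stop th acc _ hth).symm
      · rw [if_neg hth]; rfl
  | succ n ih =>
      rw [pvLoopB]
      by_cases hth : th ≤ PySem.Set.len acc
      · rw [if_pos hth]; exact (pv_walk_stop th acc _ hth).symm
      · rw [if_neg hth]
        split
        · next hnone =>
            have : items = [] := (PySem.List.max?_eq_none_iff _ _).mp hnone
            subst this; rfl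
        · next best hmax =>
            have hmem : best ∈ items := PySem.List.max?_mem hmax
            rw [pv_sorted_cons_max items best hnd hmax]
            simp only [pvWalk, if_neg hth]
            rw [PySem.List.remove?_eq_some_erase items best hmem, Option.getD_some]
            have hlen' : (items.erase best).length ≤ n := by
              have h1 := List.length_erase_of_mem hmem
              have h2 := List.length_pos_of_mem hmem
              omega
            have hnd' : ((items.erase best).map Prod.fst).Nodup :=
              hnd.sublist (List.erase_sublist.map Prod.fst)
            exact ih (items.erase best) (PySem.Set.update acc best.2) hlen' hnd'

theorem pv_loopB_eq_walk (th : Int) (items : List (Int × List String))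
    (acc : PySem.Set String) (hnd : (items.map Prod.fst).Nodup) :
    pvLoopB th acc items = pvWalk th acc (PySem.List.sorted items (fun p => p.1) true) :=
  pv_loopB_eq_walk_aux items.length th items acc (Nat.le_refl _) hnd

-- ===== VERDICT (by name: the statement is the Claim_ definition above) =====
theorem get_top_heuristic_grades_spec : Claim_equal_get_top_heuristic_grades := by
  intro gd th _ hpre
  unfold Spec_get_top_heuristic_grades get_top_heuristic_grades get_top_heuristic_grades_alt
  rw [pv_keys_eq gd hpre.1, pv_loopB_eq_walk th gd PySem.Set.empty hpre.1]
  rw [show ((PySem.List.sorted gd (fun p => p.1) true).map (·.1))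
        = ((PySem.List.sorted gd (fun p => p.1) true).map Prod.fst) from rfl]
  apply pv_loopA_eq_walk
  intro p hp
  have hm : p ∈ gd := (PySem.List.mem_sorted _ _ _ _).mp hp
  rw [pv_lookup_of_mem hpre.1 (by simpa using hm)]
  rfl
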